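-- pv_equiv track=rewrite | github.com/reqhiem/PC_Laboratorio | Examen2PC/P9_String/P9_String.py | best_array_fixed_k
-- ===== SOURCE A (Python) =====
-- def best_array_fixed_k( arr, length, k ):
--     _sum = 0
--     best = 0
--     for x in range( 0, length ):
--         _sum = _sum + arr[x%(len(arr))]
--         if x >= k:
--             _sum = _sum - arr[(x - k)%(len(arr))]
--         if x >= k - 1:
--             best = max( best, _sum )
--     return best
-- ===== SOURCE B (Python) =====
-- def best_array_fixed_k(arr, length, k):
--     # Window sums are periodic in the start position with period len(arr):
--     # compute them from prefix sums over one period only, O(len(arr)) work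
--     # instead of O(length).
--     if k <= 0 or length < k:
--         return 0
--     n = len(arr)
--     prefix = [0]
--     run = 0
--     for v in arr:
--         run += v
--         prefix.append(run)
--     total = prefix[n]
--
--     def s(m):
--         return (m // n) * total + prefix[m % n]
--
--     best = 0
--     lo = k - 1
--     hi = min(length, lo + n)
--     for x in range(lo, hi):
--         best = max(best, s(x + 1) - s(x + 1 - k))
--     return best
-- ===== Notes on version B (the rewrite author's own statement) =====
-- stated objective: alternative
-- what changed: B replaces A's incremental sliding-window loop over all `length` positions by prefix sums over one copy of arr plus the fact that cyclic window sums are periodic with period len(arr), so it evaluates only min(length-k+1, len(arr)) window positions directly from the prefix sums.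
-- outside the precondition, e.g. on best_array_fixed_k([-4, -5, 7], 13, -4): A returns 1, B returns 0
import Mathlib
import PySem

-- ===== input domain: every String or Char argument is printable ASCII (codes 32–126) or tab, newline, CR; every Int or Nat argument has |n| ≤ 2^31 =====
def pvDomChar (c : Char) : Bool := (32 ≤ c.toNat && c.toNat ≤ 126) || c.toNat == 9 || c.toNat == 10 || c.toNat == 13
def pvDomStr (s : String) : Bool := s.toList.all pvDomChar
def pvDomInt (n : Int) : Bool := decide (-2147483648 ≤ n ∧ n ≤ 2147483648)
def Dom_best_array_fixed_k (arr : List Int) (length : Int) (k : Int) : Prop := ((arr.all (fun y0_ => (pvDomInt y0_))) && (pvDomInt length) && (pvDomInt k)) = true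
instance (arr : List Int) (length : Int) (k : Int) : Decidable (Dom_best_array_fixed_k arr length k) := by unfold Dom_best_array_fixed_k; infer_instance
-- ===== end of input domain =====

-- B computes the same max cyclic sliding-window sum from prefix sums over one copy of arr,
-- using that the window sums are periodic in the start position; equal return value on Pre_.


-- ===== PORT A =====
-- A's loop body: _sum update (add arr[x%n], subtract arr[(x-k)%n] when x>=k), best update
def pvStepA (arr : List Int) (k : Int) (st : Int × Int) (x : Int) : Int × Int :=
  let n : Int := arr.length
  let s1 := st.1 + PySem.List.pyGetD arr (PySem.Int.mod x n) 0
  let s2 := if k ≤ x then s1 - PySem.List.pyGetD arr (PySem.Int.mod (x - k) n) 0 else s1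
  let b := if k - 1 ≤ x then max st.2 s2 else st.2
  (s2, b)

def best_array_fixed_k (arr : List Int) (length : Int) (k : Int) : Int :=
  ((PySem.List.pyRange 0 length 1).foldl (pvStepA arr k) (0, 0)).2

-- ===== PORT B =====
def best_array_fixed_k_alt (arr : List Int) (length : Int) (k : Int) : Int :=
  if k ≤ 0 ∨ length < k then 0
  else
    let n : Int := arr.length
    let pr := (arr.foldl (fun (st : List Int × Int) v => (st.1 ++ [st.2 + v], st.2 + v)) ([0], 0)).1
    let total := PySem.List.pyGetD pr n 0
    let s : Int → Int := fun m => PySem.Int.floordiv m n * total + PySem.List.pyGetD pr (PySem.Int.mod m n) 0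
    let lo := k - 1
    let hi := min length (lo + n)
    (PySem.List.pyRange lo hi 1).foldl (fun b x => max b (s (x + 1) - s (x + 1 - k))) 0

-- ===== PRECONDITION & SPEC =====
-- Pre_ restricts to the task's natural domain: window size k ≥ 0 (for k < 0 A's '_sum' telescopes
-- differences and is no window sum), and arr nonempty whenever length > 0 (on [] with length > 0
-- both programs hit a ZeroDivisionError from '% len(arr)' resp. '// n').
def Pre_best_array_fixed_k (arr : List Int) (length : Int) (k : Int) : Prop :=
  0 ≤ k ∧ (arr = [] → length ≤ 0)
instance (arr : List Int) (length : Int) (k : Int) : Decidable (Pre_best_array_fixed_k arr length k) := by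
  unfold Pre_best_array_fixed_k; infer_instance

def pvWitness_best_array_fixed_k : List Int × Int × Int := ([1, -2, 3], 7, 2)

def Spec_best_array_fixed_k (arr : List Int) (length : Int) (k : Int) (out : Int) : Prop := out = best_array_fixed_k_alt arr length k
instance (arr : List Int) (length : Int) (k : Int) (out : Int) : Decidable (Spec_best_array_fixed_k arr length k out) := by unfold Spec_best_array_fixed_k; infer_instance

-- ===== CLAIM (what is proved, stated in full; the proofs are below) =====
def Claim_equal_best_array_fixed_k : Prop := ∀ (arr : List Int) (length : Int) (k : Int), Dom_best_array_fixed_k arr length k → Pre_best_array_fixed_k arr length k → Spec_best_array_fixed_k arr length k (best_array_fixed_k arr length k)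

-- ===== LEMMAS AND PROOFS =====

-- cyclic element, cyclic prefix sum, window sum, plain prefix sum (proof-side models)
def pvA (arr : List Int) (j : Nat) : Int := arr.getD (j % arr.length) 0

def pvS (arr : List Int) : Nat → Int
  | 0 => 0
  | m + 1 => pvS arr m + pvA arr m

def pvP (arr : List Int) (m : Nat) : Int := (arr.take m).sum

def pvW (arr : List Int) (K u : Nat) : Int := pvS arr (u + 1) - pvS arr (u + 1 - K)

-- the Nat interval [a, b) and the running max of window sums over it
def pvIv (a b : Nat) : List Nat := (List.range (b - a)).map (a + ·)

def pvF (arr : List Int) (K : Nat) (l : List Nat) : Int :=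
  l.foldl (fun acc u => max acc (pvW arr K u)) 0

-- A's best value after t loop iterations
def pvMx (arr : List Int) (K : Nat) : Nat → Int
  | 0 => 0
  | t + 1 => if K ≤ t + 1 then max (pvMx arr K t) (pvW arr K t) else pvMx arr K t

lemma pv_mem_pvIv {a b u : Nat} : u ∈ pvIv a b ↔ a ≤ u ∧ u < b := by
  simp only [pvIv, List.mem_map, List.mem_range]
  constructor
  · rintro ⟨j, hj, rfl⟩; omega
  · intro h; exact ⟨u - a, by omega, by omega⟩

lemma pv_pvIv_succ {a b : Nat} (h : a ≤ b) : pvIv a (b + 1) = pvIv a b ++ [b] := by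
  have : b + 1 - a = (b - a) + 1 := by omega
  simp only [pvIv, this, List.range_succ, List.map_append, List.map_cons, List.map_nil]
  congr 2
  omega

lemma pv_fold_max_le {f : Nat → Int} {c : Int} :
    ∀ (l : List Nat) (init : Int), init ≤ c → (∀ y ∈ l, f y ≤ c) →
      l.foldl (fun a y => max a (f y)) init ≤ c := by
  intro l
  induction l with
  | nil => intro init h _; simpa using h
  | cons x t ih =>
      intro init h hall
      simp only [List.foldl_cons]
      exact ih _ (max_le h (hall x (by simp))) fun y hy => hall y (by simp [hy])

lemma pv_pvP_succ (arr : List Int) (m : Nat) (h : m < arr.length) :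
    pvP arr (m + 1) = pvP arr m + arr.getD m 0 := by
  rw [pvP, pvP, List.take_add_one, List.sum_append, List.getElem?_eq_getElem h]
  simp [List.getD, List.getElem?_eq_getElem h]

lemma pv_pvS_eq_pvP (arr : List Int) (m : Nat) (h : m ≤ arr.length) : pvS arr m = pvP arr m := by
  induction m with
  | zero => simp [pvS, pvP]
  | succ t ih =>
      have ht : t < arr.length := by omega
      rw [pvS, pv_pvP_succ arr t ht, ih (by omega)]
      congr 1
      simp [pvA, Nat.mod_eq_of_lt ht]

lemma pv_pvS_add_len (arr : List Int) (m : Nat) :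
    pvS arr (m + arr.length) = pvS arr m + arr.sum := by
  induction m with
  | zero =>
      rw [Nat.zero_add, pv_pvS_eq_pvP arr _ le_rfl]
      simp [pvS, pvP]
  | succ t ih =>
      have : t + 1 + arr.length = (t + arr.length) + 1 := by omega
      rw [this, pvS, ih, pvS]
      have : pvA arr (t + arr.length) = pvA arr t := by
        simp [pvA, Nat.add_mod_right]
      rw [this]; ring

lemma pv_pvS_add_mul (arr : List Int) (r q : Nat) :
    pvS arr (r + q * arr.length) = pvS arr r + q * arr.sum := by
  induction q with
  | zero => simp
  | succ p ih =>
      have : r + (p + 1) * arr.length = (r + p * arr.length) + arr.length := by ring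
      rw [this, pv_pvS_add_len, ih]
      push_cast; ring

lemma pv_pvW_period (arr : List Int) {K u : Nat} (hu : K ≤ u + 1) :
    pvW arr K (u + arr.length) = pvW arr K u := by
  have h2 : u + 1 + arr.length - K = (u + 1 - K) + arr.length := by omega
  rw [pvW, Nat.add_right_comm, h2, pv_pvS_add_len, pv_pvS_add_len, pvW]
  ring

lemma pv_pvW_period_mul (arr : List Int) {K u : Nat} (hu : K ≤ u + 1) (q : Nat) :
    pvW arr K (u + q * arr.length) = pvW arr K u := by
  induction q with
  | zero => simp
  | succ p ih =>
      have : u + (p + 1) * arr.length = (u + p * arr.length) + arr.length := by ring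
      rw [this, pv_pvW_period arr (by omega), ih]

-- A's fold characterization (k = ↑K, arr nonempty)
lemma pv_A_fold (arr : List Int) (K : Nat) (t : Nat) :
    ((List.range t).map (Nat.cast : Nat → Int)).foldl (pvStepA arr (K : Int)) (0, 0)
      = (pvS arr t - pvS arr (t - K), pvMx arr K t) := by
  induction t with
  | zero => simp [pvS, pvMx]
  | succ t ih =>
      rw [List.range_succ, List.map_append, List.foldl_append, ih]
      simp only [List.map_cons, List.map_nil, List.foldl_cons, List.foldl_nil]
      have g1 : PySem.List.pyGetD arr (PySem.Int.mod (t : Int) ((arr.length : Nat) : Int)) 0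
          = pvA arr t := by
        rw [PySem.Int.mod_natCast, PySem.List.pyGetD_natCast]; rfl
      by_cases hKt : K ≤ t
      · have hc : ((K : Int) ≤ (t : Int)) := by exact_mod_cast hKt
        have hc1 : ((K : Int) - 1 ≤ (t : Int)) := by omega
        have g2 : PySem.List.pyGetD arr (PySem.Int.mod ((t : Int) - (K : Int)) ((arr.length : Nat) : Int)) 0
            = pvA arr (t - K) := by
          rw [show ((t : Int) - (K : Int)) = ((t - K : Nat) : Int) by omega,
            PySem.Int.mod_natCast, PySem.List.pyGetD_natCast]; rfl
        have e1 : t + 1 - K = (t - K) + 1 := by omega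
        simp only [pvStepA, g1, g2, if_pos hc, if_pos hc1, pvMx, pvS, e1,
          if_pos (show K ≤ t + 1 by omega)]
        simp only [pvW, e1, pvS, Prod.mk.injEq]
        exact ⟨by ring, by congr 1; ring⟩
      · have hc : ¬ ((K : Int) ≤ (t : Int)) := by exact_mod_cast hKt
        have e0 : t - K = 0 := by omega
        by_cases hK1 : K ≤ t + 1
        · -- K = t + 1
          have hc1 : ((K : Int) - 1 ≤ (t : Int)) := by
            have : K ≤ t + 1 := hK1
            omega
          have e1 : t + 1 - K = 0 := by omega
          simp only [pvStepA, g1, if_neg hc, if_pos hc1, pvMx, pvS, e0, e1,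
            if_pos hK1, pvW]
          simp only [Prod.mk.injEq]
          exact ⟨by ring, by congr 1; ring⟩
        · have hc1 : ¬ ((K : Int) - 1 ≤ (t : Int)) := by
            have : ¬ (K ≤ t + 1) := hK1
            omega
          have e1 : t + 1 - K = 0 := by omega
          simp only [pvStepA, g1, if_neg hc, if_neg hc1, pvMx, pvS, e0, e1,
            if_neg hK1]
          simp only [Prod.mk.injEq]
          exact ⟨by ring, trivial⟩

-- pvMx as a fold over the interval [K-1, t)
lemma pv_pvMx_eq_F (arr : List Int) {K : Nat} (hK : 1 ≤ K) (t : Nat) :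
    pvMx arr K t = pvF arr K (pvIv (K - 1) t) := by
  induction t with
  | zero => simp [pvMx, pvF, pvIv]
  | succ t ih =>
      by_cases h : K ≤ t + 1
      · have hle : K - 1 ≤ t := by omega
        rw [pvMx, if_pos h, pv_pvIv_succ hle, pvF, List.foldl_append, ih]
        rfl
      · have e1 : t + 1 - (K - 1) = 0 := by omega
        have e0 : t - (K - 1) = 0 := by omega
        rw [pvMx, if_neg h, ih]
        simp [pvIv, e0, e1]

-- truncation to one period
lemma pv_F_trunc (arr : List Int) {K L : Nat} (hN : arr ≠ []) (hK : 1 ≤ K) :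
    pvF arr K (pvIv (K - 1) L) = pvF arr K (pvIv (K - 1) (min L (K - 1 + arr.length))) := by
  have hN1 : 0 < arr.length := List.length_pos_of_ne_nil hN
  unfold pvF
  apply le_antisymm
  · apply pv_fold_max_le _ _ (PySem.List.le_foldl_max_int _ _ _).1
    intro u hu
    rcases pv_mem_pvIv.mp hu with ⟨h1, h2⟩
    obtain ⟨q, r, hrlt, hqr⟩ : ∃ q r, r < arr.length ∧ u = ((K - 1) + r) + q * arr.length := by
      refine ⟨(u - (K - 1)) / arr.length, (u - (K - 1)) % arr.length, Nat.mod_lt _ hN1, ?_⟩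
      have hdm := Nat.div_add_mod (u - (K - 1)) arr.length
      rw [Nat.mul_comm] at hdm
      omega
    have hmem : (K - 1) + r ∈ pvIv (K - 1) (min L (K - 1 + arr.length)) :=
      pv_mem_pvIv.mpr ⟨by omega, by omega⟩
    have hw : pvW arr K u = pvW arr K ((K - 1) + r) := by
      rw [hqr, pv_pvW_period_mul arr (by omega)]
    rw [hw]
    exact (PySem.List.le_foldl_max_int _ _ _).2 _ hmem
  · apply pv_fold_max_le _ _ (PySem.List.le_foldl_max_int _ _ _).1
    intro u hu
    rcases pv_mem_pvIv.mp hu with ⟨h1, h2⟩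
    exact (PySem.List.le_foldl_max_int _ _ _).2 _ (pv_mem_pvIv.mpr ⟨h1, by omega⟩)

lemma pv_prefix_build (l : List Int) : ∀ (acc : List Int) (r : Int),
    l.foldl (fun (st : List Int × Int) v => (st.1 ++ [st.2 + v], st.2 + v)) (acc, r)
      = (acc ++ (List.range l.length).map (fun i => r + (l.take (i + 1)).sum), r + l.sum) := by
  induction l with
  | nil => intro acc r; simp
  | cons v tl ih =>
      intro acc r
      simp only [List.foldl_cons]
      rw [ih]
      simp only [List.length_cons, List.range_succ_eq_map, List.map_cons, List.map_map,
        Prod.mk.injEq]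
      constructor
      · simp [Function.comp_def, List.take_succ_cons, add_assoc]
      · simp [List.sum_cons]; ring

-- B's characterization
lemma pv_B_char (arr : List Int) (K L : Nat) (hN : arr ≠ []) (hK : 1 ≤ K) (hL : K ≤ L) :
    best_array_fixed_k_alt arr (L : Int) (K : Int)
      = pvF arr K (pvIv (K - 1) (min L (K - 1 + arr.length))) := by
  have hN1 : 0 < arr.length := List.length_pos_of_ne_nil hN
  have hcond : ¬ ((K : Int) ≤ 0 ∨ (L : Int) < (K : Int)) := by omega
  unfold best_array_fixed_k_alt
  rw [if_neg hcond]
  rw [pv_prefix_build]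
  simp only [zero_add]
  have hpr0 : ([0] : List Int) ++ (List.range arr.length).map (fun i => (arr.take (i + 1)).sum)
      = (List.range (arr.length + 1)).map (pvP arr) := by
    rw [List.range_succ_eq_map, List.map_cons, List.map_map]
    simp [pvP, Function.comp_def]
  rw [hpr0]
  have hget : ∀ m : Nat, m ≤ arr.length →
      PySem.List.pyGetD ((List.range (arr.length + 1)).map (pvP arr)) ((m : Nat) : Int) 0
        = pvP arr m := by
    intro m hm
    rw [PySem.List.pyGetD_natCast, PySem.List.getD_map_range _ _ _ _ (by omega)]
  have hs : ∀ u : Nat,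
      PySem.Int.floordiv ((u : Nat) : Int) ((arr.length : Nat) : Int)
          * (PySem.List.pyGetD ((List.range (arr.length + 1)).map (pvP arr)) ((arr.length : Nat) : Int) 0)
        + PySem.List.pyGetD ((List.range (arr.length + 1)).map (pvP arr))
            (PySem.Int.mod ((u : Nat) : Int) ((arr.length : Nat) : Int)) 0
      = pvS arr u := by
    intro u
    rw [PySem.Int.floordiv_natCast, PySem.Int.mod_natCast, hget _ le_rfl,
      hget _ (le_of_lt (Nat.mod_lt _ hN1))]
    have h1 : pvS arr (u % arr.length + (u / arr.length) * arr.length)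
        = pvS arr (u % arr.length) + (u / arr.length : Nat) * arr.sum := pv_pvS_add_mul arr _ _
    rw [Nat.mod_add_div'] at h1
    have h2 : pvP arr arr.length = arr.sum := by simp [pvP]
    rw [h2, h1, pv_pvS_eq_pvP arr _ (le_of_lt (Nat.mod_lt _ hN1))]
    push_cast
    ring
  have hM : ((min ((L : Nat) : Int) (((K : Nat) : Int) - 1 + ((arr.length : Nat) : Int)))
      - (((K : Nat) : Int) - 1)).toNat = min L (K - 1 + arr.length) - (K - 1) := by omega
  rw [PySem.List.pyRange_one, hM, pvF, pvIv, List.foldl_map, List.foldl_map]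
  apply PySem.List.foldl_congr_mem
  intro acc j hj
  have e1 : (((K : Nat) : Int) - 1 + (j : Int) + 1) = (((K + j : Nat) : Int)) := by
    push_cast; omega
  have e2 : (((K + j : Nat) : Int) - ((K : Nat) : Int)) = ((j : Nat) : Int) := by
    push_cast; ring
  rw [e1, e2, hs, hs]
  have e3 : K - 1 + j + 1 = K + j := by omega
  have e4 : K + j - K = j := by omega
  rw [pvW, e3, e4]

lemma pv_pvMx_zero (arr : List Int) (t : Nat) : pvMx arr 0 t = 0 := by
  induction t with
  | zero => rfl
  | succ p ih => simp [pvMx, ih, pvW]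

lemma pv_A_best_const (arr : List Int) (k : Int) :
    ∀ (l : List Int), (∀ x ∈ l, x < k - 1) → ∀ s b, ((l.foldl (pvStepA arr k) (s, b)).2 = b) := by
  intro l
  induction l with
  | nil => intro _ s b; rfl
  | cons x t ih =>
      intro h s b
      simp only [List.foldl_cons]
      have hx : ¬ (k - 1 ≤ x) := by have := h x (by simp); omega
      simp only [pvStepA, hx, if_false]
      exact ih (fun y hy => h y (by simp [hy])) _ _

-- ===== VERDICT (by name: the statement is the Claim_ definition above) =====
theorem best_array_fixed_k_spec : Claim_equal_best_array_fixed_k := by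
  intro arr length k _hdom hpre
  obtain ⟨hk0, hemp⟩ := hpre
  unfold Spec_best_array_fixed_k
  by_cases hk : k ≤ 0
  · -- k = 0
    have hkz : k = 0 := le_antisymm hk hk0
    subst hkz
    have hB : best_array_fixed_k_alt arr length 0 = 0 := by
      unfold best_array_fixed_k_alt
      rw [if_pos (Or.inl le_rfl)]
    rw [hB]
    by_cases hlen : length ≤ 0
    · unfold best_array_fixed_k
      rw [PySem.List.pyRange_one_eq_nil (by omega)]
      rfl
    · unfold best_array_fixed_k
      rw [PySem.List.pyRange_one,
        show (fun j : Nat => (0 : Int) + (j : Int)) = (Nat.cast : Nat → Int) from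
          funext (fun j => by simp),
        show ((length : Int) - 0).toNat = length.toNat from by omega]
      have hA := pv_A_fold arr 0 length.toNat
      simp only [Nat.cast_zero] at hA
      rw [hA]
      exact pv_pvMx_zero arr length.toNat
  · have hk1 : (1 : Int) ≤ k := by omega
    by_cases hlen : length < k
    · have hB : best_array_fixed_k_alt arr length k = 0 := by
        unfold best_array_fixed_k_alt
        rw [if_pos (Or.inr hlen)]
      rw [hB]
      unfold best_array_fixed_k
      apply pv_A_best_const arr k
      intro x hx
      rw [PySem.List.mem_pyRange_one] at hx
      omega
    · rw [Int.not_lt] at hlen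
      have harr : arr ≠ [] := by
        intro h
        have := hemp h
        omega
      have hkK : k = ((k.toNat : Nat) : Int) := by omega
      have hlL : length = ((length.toNat : Nat) : Int) := by omega
      have hK1 : 1 ≤ k.toNat := by omega
      have hKL : k.toNat ≤ length.toNat := by omega
      rw [hkK, hlL, pv_B_char arr k.toNat length.toNat harr hK1 hKL]
      unfold best_array_fixed_k
      rw [PySem.List.pyRange_one,
        show (fun j : Nat => (0 : Int) + (j : Int)) = (Nat.cast : Nat → Int) from
          funext (fun j => by simp),
        show ((((length.toNat : Nat) : Int)) - 0).toNat = length.toNat from by omega,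
        pv_A_fold arr k.toNat length.toNat]
      show pvMx arr k.toNat length.toNat = _
      rw [pv_pvMx_eq_F arr hK1, pv_F_trunc arr harr hK1]
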